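-- pv_equiv track=rewrite | github.com/tarunpinnem/marketing-intelligence-platform | services/analytics/main.py | categorize_campaign
-- ===== SOURCE A (Python) =====
-- from typing import Dict, List, Optional, Any
--
-- def categorize_campaign(campaign_data: Dict) -> str:
--     """Categorize campaign based on content and metadata"""
--     platform = campaign_data.get('platform', '').lower()
--     company = campaign_data.get('company', '').lower()
--     content = (campaign_data.get('content', '') + ' ' + campaign_data.get('name', '')).lower()
--
--     # Platform-based categorization
--     if 'facebook' in platform or 'instagram' in platform:
--         return 'Social Media'
--     elif 'google' in platform or 'search' in platform:
--         return 'Search Marketing'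
--     elif 'linkedin' in platform:
--         return 'Professional Marketing'
--     elif 'youtube' in platform:
--         return 'Video Marketing'
--     elif 'news' in platform or 'media' in platform:
--         return 'PR & Media'
--
--     # Content-based categorization
--     if any(word in content for word in ['product', 'launch', 'new']):
--         return 'Product Launch'
--     elif any(word in content for word in ['brand', 'awareness', 'identity']):
--         return 'Brand Awareness'
--     elif any(word in content for word in ['sale', 'discount', 'offer', 'deal']):
--         return 'Promotional'
--     elif any(word in content for word in ['b2b', 'enterprise', 'business']):
--         return 'B2B Marketing'
--     else:
--         return 'General Marketing'
-- ===== SOURCE B (Python) =====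
-- # One flat keyword table; a single pass keeps the lowest-ranked matching rule
-- # (rank = rule priority), instead of A's staged if/elif chain.
-- _KEYWORDS = [
--     ('facebook', 'p', 0, 'Social Media'),
--     ('instagram', 'p', 0, 'Social Media'),
--     ('google', 'p', 1, 'Search Marketing'),
--     ('search', 'p', 1, 'Search Marketing'),
--     ('linkedin', 'p', 2, 'Professional Marketing'),
--     ('youtube', 'p', 3, 'Video Marketing'),
--     ('news', 'p', 4, 'PR & Media'),
--     ('media', 'p', 4, 'PR & Media'),
--     ('product', 'c', 5, 'Product Launch'),
--     ('launch', 'c', 5, 'Product Launch'),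
--     ('new', 'c', 5, 'Product Launch'),
--     ('brand', 'c', 6, 'Brand Awareness'),
--     ('awareness', 'c', 6, 'Brand Awareness'),
--     ('identity', 'c', 6, 'Brand Awareness'),
--     ('sale', 'c', 7, 'Promotional'),
--     ('discount', 'c', 7, 'Promotional'),
--     ('offer', 'c', 7, 'Promotional'),
--     ('deal', 'c', 7, 'Promotional'),
--     ('b2b', 'c', 8, 'B2B Marketing'),
--     ('enterprise', 'c', 8, 'B2B Marketing'),
--     ('business', 'c', 8, 'B2B Marketing'),
-- ]
--
--
-- def categorize_campaign(campaign_data):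
--     platform = campaign_data.get('platform', '').lower()
--     content = (campaign_data.get('content', '') + ' ' + campaign_data.get('name', '')).lower()
--     best = None
--     for word, kind, rank, category in _KEYWORDS:
--         text = platform if kind == 'p' else content
--         if word in text and (best is None or rank < best[0]):
--             best = (rank, category)
--     return best[1] if best is not None else 'General Marketing'
-- ===== Notes on version B (the rewrite author's own statement) =====
-- stated objective: alternative
-- what changed: Replaces A's staged nine-branch if/elif keyword chain (short-circuiting in rule order over two texts) by a single pass over one flat ranked keyword table that keeps the lowest-ranked matching entry and reads its category at the end.
import Mathlib
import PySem

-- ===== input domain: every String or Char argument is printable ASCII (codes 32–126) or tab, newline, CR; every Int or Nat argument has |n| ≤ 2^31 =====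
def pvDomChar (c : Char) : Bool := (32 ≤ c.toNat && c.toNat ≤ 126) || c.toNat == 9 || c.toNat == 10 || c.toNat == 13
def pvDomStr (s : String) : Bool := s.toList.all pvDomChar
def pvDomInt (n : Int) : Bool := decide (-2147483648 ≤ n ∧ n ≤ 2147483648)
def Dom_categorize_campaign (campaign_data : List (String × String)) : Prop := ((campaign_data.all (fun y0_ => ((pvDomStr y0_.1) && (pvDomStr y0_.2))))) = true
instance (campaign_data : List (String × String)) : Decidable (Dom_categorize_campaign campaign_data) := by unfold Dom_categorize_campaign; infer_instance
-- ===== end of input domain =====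

-- B replaces A's staged if/elif keyword chain by a single pass over one flat
-- ranked keyword table, keeping the lowest-ranked match (objective: alternative).
-- Equivalence of RETURN values.

-- ===== PORT A =====
-- campaign_data.get(k, '') on the association list: first match, default ''
def pvGetStr (d : List (String × String)) (k : String) : String :=
  ((d.find? (fun p => p.1 == k)).map (fun p => p.2)).getD ""

-- string concatenation via toList (Lean's String.append is opaque to the kernel)
def pvCat (a b : String) : String := String.ofList (a.toList ++ b.toList)

def categorize_campaign (campaign_data : List (String × String)) : String :=
  let platform := PySem.Str.lower (pvGetStr campaign_data "platform")
  let _company := PySem.Str.lower (pvGetStr campaign_data "company")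
  let content := PySem.Str.lower
    (pvCat (pvCat (pvGetStr campaign_data "content") " ") (pvGetStr campaign_data "name"))
  if PySem.Str.isIn "facebook" platform || PySem.Str.isIn "instagram" platform then
    "Social Media"
  else if PySem.Str.isIn "google" platform || PySem.Str.isIn "search" platform then
    "Search Marketing"
  else if PySem.Str.isIn "linkedin" platform then
    "Professional Marketing"
  else if PySem.Str.isIn "youtube" platform then
    "Video Marketing"
  else if PySem.Str.isIn "news" platform || PySem.Str.isIn "media" platform then
    "PR & Media"
  else if ["product", "launch", "new"].any (fun w => PySem.Str.isIn w content) then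
    "Product Launch"
  else if ["brand", "awareness", "identity"].any (fun w => PySem.Str.isIn w content) then
    "Brand Awareness"
  else if ["sale", "discount", "offer", "deal"].any (fun w => PySem.Str.isIn w content) then
    "Promotional"
  else if ["b2b", "enterprise", "business"].any (fun w => PySem.Str.isIn w content) then
    "B2B Marketing"
  else
    "General Marketing"

-- ===== PORT B =====
-- flat table: (keyword, which text ('p' = platform, 'c' = content), rank, category)
def pvKeywords : List (String × String × Int × String) :=
  [("facebook", "p", 0, "Social Media"),
   ("instagram", "p", 0, "Social Media"),
   ("google", "p", 1, "Search Marketing"),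
   ("search", "p", 1, "Search Marketing"),
   ("linkedin", "p", 2, "Professional Marketing"),
   ("youtube", "p", 3, "Video Marketing"),
   ("news", "p", 4, "PR & Media"),
   ("media", "p", 4, "PR & Media"),
   ("product", "c", 5, "Product Launch"),
   ("launch", "c", 5, "Product Launch"),
   ("new", "c", 5, "Product Launch"),
   ("brand", "c", 6, "Brand Awareness"),
   ("awareness", "c", 6, "Brand Awareness"),
   ("identity", "c", 6, "Brand Awareness"),
   ("sale", "c", 7, "Promotional"),
   ("discount", "c", 7, "Promotional"),
   ("offer", "c", 7, "Promotional"),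
   ("deal", "c", 7, "Promotional"),
   ("b2b", "c", 8, "B2B Marketing"),
   ("enterprise", "c", 8, "B2B Marketing"),
   ("business", "c", 8, "B2B Marketing")]

-- one iteration of Source B's loop: keep the lowest-ranked matching keyword
def pvStep (platform content : String) (best : Option (Int × String))
    (e : String × String × Int × String) : Option (Int × String) :=
  let text := if e.2.1 == "p" then platform else content
  if PySem.Str.isIn e.1 text &&
      (match best with | none => true | some b => decide (e.2.2.1 < b.1)) then
    some (e.2.2.1, e.2.2.2)
  else
    best

def categorize_campaign_alt (campaign_data : List (String × String)) : String :=
  let platform := PySem.Str.lower (pvGetStr campaign_data "platform")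
  let content := PySem.Str.lower
    (pvCat (pvCat (pvGetStr campaign_data "content") " ") (pvGetStr campaign_data "name"))
  match pvKeywords.foldl (pvStep platform content) none with
  | some b => b.2
  | none => "General Marketing"

-- ===== PRECONDITION & SPEC =====
def Spec_categorize_campaign (campaign_data : List (String × String)) (out : String) : Prop := out = categorize_campaign_alt campaign_data
instance (campaign_data : List (String × String)) (out : String) : Decidable (Spec_categorize_campaign campaign_data out) := by unfold Spec_categorize_campaign; infer_instance

-- ===== CLAIM (what is proved, stated in full; the proofs are below) =====
def Claim_equal_categorize_campaign : Prop := ∀ (campaign_data : List (String × String)), Dom_categorize_campaign campaign_data → Spec_categorize_campaign campaign_data (categorize_campaign campaign_data)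

-- ===== LEMMAS AND PROOFS =====

-- first matching entry of the table (the value B's fold computes on a rank-sorted table)
def pvFirstMatch (platform content : String) :
    List (String × String × Int × String) → Option (Int × String)
  | [] => none
  | e :: t =>
    if PySem.Str.isIn e.1 (if e.2.1 == "p" then platform else content) then
      some (e.2.2.1, e.2.2.2)
    else pvFirstMatch platform content t

-- once best holds rank r and every remaining rank is ≥ r, the fold never updates
theorem pvStep_stop (p c : String) (l : List (String × String × Int × String))
    (r : Int) (cat : String) (h : ∀ e ∈ l, r ≤ e.2.2.1) :
    l.foldl (pvStep p c) (some (r, cat)) = some (r, cat) := by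
  induction l with
  | nil => rfl
  | cons e t ih =>
    have h1 : r ≤ e.2.2.1 := h e (by simp)
    have hstep : pvStep p c (some (r, cat)) e = some (r, cat) := by
      unfold pvStep
      simp [show ¬(e.2.2.1 < r) from by omega]
    simpa [List.foldl, hstep] using ih (fun e he => h e (by simp [he]))

-- on a table whose ranks are nondecreasing, B's min-rank fold is the first match
theorem pvFold_eq_firstMatch (p c : String) (l : List (String × String × Int × String))
    (h : l.Pairwise (fun a b => a.2.2.1 ≤ b.2.2.1)) :
    l.foldl (pvStep p c) none = pvFirstMatch p c l := by
  induction l with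
  | nil => rfl
  | cons e t ih =>
    rcases List.pairwise_cons.mp h with ⟨he, ht⟩
    by_cases hc : PySem.Str.isIn e.1 (if e.2.1 == "p" then p else c) = true
    · have hstep : pvStep p c none e = some (e.2.2.1, e.2.2.2) := by
        unfold pvStep; simp only [hc, Bool.true_and, if_true]
      rw [List.foldl_cons, hstep,
        pvStep_stop p c t e.2.2.1 e.2.2.2 (fun x hx => he x hx)]
      rw [show pvFirstMatch p c (e :: t) =
        if PySem.Str.isIn e.1 (if e.2.1 == "p" then p else c) then some (e.2.2.1, e.2.2.2)
        else pvFirstMatch p c t from rfl, if_pos hc]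
    · have hstep : pvStep p c none e = none := by
        unfold pvStep
        simp only [eq_false_of_ne_true hc]
        simp
      rw [List.foldl_cons, hstep, ih ht]
      rw [show pvFirstMatch p c (e :: t) =
        if PySem.Str.isIn e.1 (if e.2.1 == "p" then p else c) then some (e.2.2.1, e.2.2.2)
        else pvFirstMatch p c t from rfl, if_neg hc]

-- the B table's first match, written out (proved by unfolding the literal table)
theorem firstMatch_table (p c : String) : pvFirstMatch p c pvKeywords =
    (if PySem.Str.isIn "facebook" p then some ((0 : Int), "Social Media") else if PySem.Str.isIn "instagram" p then some ((0 : Int), "Social Media") else if PySem.Str.isIn "google" p then some ((1 : Int), "Search Marketing") else if PySem.Str.isIn "search" p then some ((1 : Int), "Search Marketing") else if PySem.Str.isIn "linkedin" p then some ((2 : Int), "Professional Marketing") else if PySem.Str.isIn "youtube" p then some ((3 : Int), "Video Marketing") else if PySem.Str.isIn "news" p then some ((4 : Int), "PR & Media") else if PySem.Str.isIn "media" p then some ((4 : Int), "PR & Media") else if PySem.Str.isIn "product" c then some ((5 : Int), "Product Launch") else if PySem.Str.isIn "launch" c then some ((5 : Int), "Product Launch") else if PySem.Str.isIn "new" c then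 some ((5 : Int), "Product Launch") else if PySem.Str.isIn "brand" c then some ((6 : Int), "Brand Awareness") else if PySem.Str.isIn "awareness" c then some ((6 : Int), "Brand Awareness") else if PySem.Str.isIn "identity" c then some ((6 : Int), "Brand Awareness") else if PySem.Str.isIn "sale" c then some ((7 : Int), "Promotional") else if PySem.Str.isIn "discount" c then some ((7 : Int), "Promotional") else if PySem.Str.isIn "offer" c then some ((7 : Int), "Promotional") else if PySem.Str.isIn "deal" c then some ((7 : Int), "Promotional") else if PySem.Str.isIn "b2b" c then some ((8 : Int), "B2B Marketing") else if PySem.Str.isIn "enterprise" c then some ((8 : Int), "B2B Marketing") else if PySem.Str.isIn "business" c then some ((8 : Int), "B2B Marketing") else none) := rfl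

set_option maxHeartbeats 4000000 in
-- A's keyword chain equals B's first-match table readout, for any two texts
theorem chain_eq (p c : String) :
    (if PySem.Str.isIn "facebook" p || PySem.Str.isIn "instagram" p then "Social Media"
     else if PySem.Str.isIn "google" p || PySem.Str.isIn "search" p then "Search Marketing"
     else if PySem.Str.isIn "linkedin" p then "Professional Marketing"
     else if PySem.Str.isIn "youtube" p then "Video Marketing"
     else if PySem.Str.isIn "news" p || PySem.Str.isIn "media" p then "PR & Media"
     else if ["product", "launch", "new"].any (fun w => PySem.Str.isIn w c) then "Product Launch"
     else if ["brand", "awareness", "identity"].any (fun w => PySem.Str.isIn w c) then "Brand Awareness"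
     else if ["sale", "discount", "offer", "deal"].any (fun w => PySem.Str.isIn w c) then "Promotional"
     else if ["b2b", "enterprise", "business"].any (fun w => PySem.Str.isIn w c) then "B2B Marketing"
     else "General Marketing") =
    (match (if PySem.Str.isIn "facebook" p then some ((0 : Int), "Social Media") else if PySem.Str.isIn "instagram" p then some ((0 : Int), "Social Media") else if PySem.Str.isIn "google" p then some ((1 : Int), "Search Marketing") else if PySem.Str.isIn "search" p then some ((1 : Int), "Search Marketing") else if PySem.Str.isIn "linkedin" p then some ((2 : Int), "Professional Marketing") else if PySem.Str.isIn "youtube" p then some ((3 : Int), "Video Marketing") else if PySem.Str.isIn "news" p then some ((4 : Int), "PR & Media") else if PySem.Str.isIn "media" p then some ((4 : Int), "PR & Media") else if PySem.Str.isIn "product" c then some ((5 : Int), "Product Launch") else if PySem.Str.isIn "launch" c then some ((5 : Int), "Product Launch") else if PySem.Str.isIn "new" c then some ((5 : Int), "Product Launch") else if PySem.Str.isIn "brand" c then some ((6 : Int), "Brand Awareness") else if PySem.Str.isIn "awareness" c then some ((6 : Int), "Brand Awareness") else if PySem.Str.isIn "identity" c then some ((6 : Int), "Brand Awareness") else if PySem.Str.isIn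 "sale" c then some ((7 : Int), "Promotional") else if PySem.Str.isIn "discount" c then some ((7 : Int), "Promotional") else if PySem.Str.isIn "offer" c then some ((7 : Int), "Promotional") else if PySem.Str.isIn "deal" c then some ((7 : Int), "Promotional") else if PySem.Str.isIn "b2b" c then some ((8 : Int), "B2B Marketing") else if PySem.Str.isIn "enterprise" c then some ((8 : Int), "B2B Marketing") else if PySem.Str.isIn "business" c then some ((8 : Int), "B2B Marketing") else none) with
     | some b => b.2
     | none => "General Marketing") := by
  simp only [List.any_cons, List.any_nil, Bool.or_false]
  by_cases h0 : PySem.Str.isIn "facebook" p = true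
  · simp_all
  · by_cases h1 : PySem.Str.isIn "instagram" p = true
    · simp_all
    · by_cases h2 : PySem.Str.isIn "google" p = true
      · simp_all
      · by_cases h3 : PySem.Str.isIn "search" p = true
        · simp_all
        · by_cases h4 : PySem.Str.isIn "linkedin" p = true
          · simp_all
          · by_cases h5 : PySem.Str.isIn "youtube" p = true
            · simp_all
            · by_cases h6 : PySem.Str.isIn "news" p = true
              · simp_all
              · by_cases h7 : PySem.Str.isIn "media" p = true
                · simp_all
                · by_cases h8 : PySem.Str.isIn "product" c = true
                  · simp_all
                  · by_cases h9 : PySem.Str.isIn "launch" c = true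
                    · simp_all
                    · by_cases h10 : PySem.Str.isIn "new" c = true
                      · simp_all
                      · by_cases h11 : PySem.Str.isIn "brand" c = true
                        · simp_all
                        · by_cases h12 : PySem.Str.isIn "awareness" c = true
                          · simp_all
                          · by_cases h13 : PySem.Str.isIn "identity" c = true
                            · simp_all
                            · by_cases h14 : PySem.Str.isIn "sale" c = true
                              · simp_all
                              · by_cases h15 : PySem.Str.isIn "discount" c = true
                                · simp_all
                                · by_cases h16 : PySem.Str.isIn "offer" c = true
                                  · simp_all
                                  · by_cases h17 : PySem.Str.isIn "deal" c = true
                                    · simp_all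
                                    · by_cases h18 : PySem.Str.isIn "b2b" c = true
                                      · simp_all
                                      · by_cases h19 : PySem.Str.isIn "enterprise" c = true
                                        · simp_all
                                        · by_cases h20 : PySem.Str.isIn "business" c = true
                                          · simp_all
                                          · simp_all

-- ===== VERDICT (by name: the statement is the Claim_ definition above) =====
theorem categorize_campaign_spec : Claim_equal_categorize_campaign := by
  intro cd _
  unfold Spec_categorize_campaign categorize_campaign categorize_campaign_alt
  have hfold := fun p c => pvFold_eq_firstMatch p c pvKeywords (by unfold pvKeywords; decide)
  simp only [hfold, firstMatch_table]
  exact chain_eq _ _
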